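-- pv_equiv track=rewrite | github.com/elice-02-study-01-algorithm/python | CJ_Kim/programmers/dynamic_programming/42895.py | solution
-- ===== SOURCE A (Python) =====
-- def solution(N, number):
--
--     # 1이 나오는 유일한 경우
--     if N==number:
--         return 1
--
--     ansList = [ set() for _ in range(8)]
--
--
--     for i, x in enumerate(ansList, start=1):
--         x.add(int(str(N)*i))
--     # ex. [{5}, {55}, {555}, {5555}, {55555}, {555555}, {5555555}, {55555555}]
--
--     # 총 크기가 N으로 정해져 있고, i와 N-i의 연산이 각각 필요할 때 아래처럼 range쓰기
--     for i in range(1, 8):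
--         for j in range(i):
--             # 집합 S(j개로 연산한 것들)
--             for ope1 in ansList[j]:
--                 # 집합 S(i-j-1개로 연산한 것들)
--                 for ope2 in ansList[i-j-1]:
--                     # 연산한 것들 모두 합집합시키기
--                     ansList[i].add(ope1+ope2)
--                     ansList[i].add(ope1-ope2)
--                     ansList[i].add(ope1*ope2)
--                     if ope2 != 0:
--                         ansList[i].add(ope1//ope2)
--         # 최솟값을 구해야 하고, 최소부터 계산을 하면서 계산값들을 구하고 있으니
--         # for문 내에 if으로 그때그때 구하고 탈출시키는 방법
--         if number in ansList[i]:
--             answer = i+1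
--             break
--         else:
--             answer = -1
--
--     return answer
-- ===== SOURCE B (Python) =====
-- def solution(N, number):
--     # Memoized recursion: reachable(k) = set of values expressible with exactly k copies of N.
--     if N == number:
--         return 1
--     cache = {}
--
--     def reachable(k):
--         if k in cache:
--             return cache[k]
--         s = {int(str(N) * k)}
--         for j in range(1, k):
--             for a in reachable(j):
--                 for b in reachable(k - j):
--                     s.add(a + b)
--                     s.add(a - b)
--                     s.add(a * b)
--                     if b != 0:
--                         s.add(a // b)
--         cache[k] = s
--         return s
--
--     for k in range(2, 9):
--         if number in reachable(k):
--             return k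
--     return -1
-- ===== Notes on version B (the rewrite author's own statement) =====
-- stated objective: alternative
-- what changed: Replaces the 8-slot array mutated in place with a break/answer flag by a memoized recursive helper reachable(k) defined by the split recurrence over (j, k-j), consumed by a simple first-hit scan over k=2..8.
-- outside the precondition, e.g. on solution(-5, 7): A raises ValueError, B raises ValueError
import Mathlib
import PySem

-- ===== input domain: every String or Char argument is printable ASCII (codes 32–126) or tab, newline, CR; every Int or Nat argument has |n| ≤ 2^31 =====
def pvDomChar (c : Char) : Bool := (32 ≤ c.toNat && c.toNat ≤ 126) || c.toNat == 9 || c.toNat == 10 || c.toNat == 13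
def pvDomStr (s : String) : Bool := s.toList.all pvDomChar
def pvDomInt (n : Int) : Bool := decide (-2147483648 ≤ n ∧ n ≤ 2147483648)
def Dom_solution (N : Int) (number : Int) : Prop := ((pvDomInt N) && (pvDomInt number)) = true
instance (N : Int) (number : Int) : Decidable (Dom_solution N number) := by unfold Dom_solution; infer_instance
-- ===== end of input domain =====

-- B replaces A's in-place 8-slot array DP with break/answer flag by a recursive
-- reachable(k) over the split recurrence (j, k-j) plus a first-hit scan over k = 2..8 (objective: alternative).

-- shared by both ports: int(str(N)*i) — none = ValueError (negative N, i ≥ 2), excluded by Pre_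
def pyRepInt (N : Int) (i : Nat) : Int :=
  (PySem.Int.ofChars? (List.flatten (List.replicate i (PySem.Int.toChars N)))).getD 0

-- shared by both ports: the identical 4-line innermost loop body of both Pythons
-- (s.add(a+b); s.add(a-b); s.add(a*b); if b != 0: s.add(a//b))
def ops4 (s : PySem.Set Int) (a b : Int) : PySem.Set Int :=
  let s := PySem.Set.add s (a + b)
  let s := PySem.Set.add s (a - b)
  let s := PySem.Set.add s (a * b)
  if b ≠ 0 then PySem.Set.add s (PySem.Int.floordiv a b) else s

-- shared by both ports: the identical two innermost 'for a in …: for b in …' loops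
def pairFold (xs ys : List Int) (s : PySem.Set Int) : PySem.Set Int :=
  xs.foldl (fun s a => ys.foldl (fun s b => ops4 s a b) s) s

-- ===== PORT A =====
-- ansList[i] after its 'for j in range(i)' loop (reads only slots j, i-j-1 < i; adds into slot i)
def stepA (ans : List (PySem.Set Int)) (i : Nat) : PySem.Set Int :=
  (List.range i).foldl
    (fun s j => pairFold (ans.getD j PySem.Set.empty) (ans.getD (i - j - 1) PySem.Set.empty) s)
    (ans.getD i PySem.Set.empty)

-- 'for i in range(1, 8): … if number in ansList[i]: answer = i+1; break; else: answer = -1'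
def goA (number : Int) (ans : List (PySem.Set Int)) (i : Nat) : Int :=
  if i < 8 then
    let s := stepA ans i
    if PySem.Set.contains s number then ((i : Int) + 1)
    else goA number (ans.set i s) (i + 1)
  else -1
termination_by 8 - i

def solution (N : Int) (number : Int) : Int :=
  if N = number then 1
  else
    -- ansList = [set() for _ in range(8)]; for i, x in enumerate(ansList, start=1): x.add(int(str(N)*i))
    let ansList : List (PySem.Set Int) :=
      (List.range 8).map (fun k => PySem.Set.add PySem.Set.empty (pyRepInt N (k + 1)))
    goA number ansList 1

-- ===== PORT B =====
-- recursive helper: the set of values expressible with exactly k copies of N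
-- (Source B's dict cache is pure memoization of this recursion and is dropped in the port)
def reachB (N : Int) (k : Nat) : PySem.Set Int :=
  (List.range' 1 (k - 1)).attach.foldl
    (fun s jh => pairFold (reachB N jh.1) (reachB N (k - jh.1)) s)
    (PySem.Set.add PySem.Set.empty (pyRepInt N k))
termination_by k
decreasing_by
  · have := List.mem_range'_1.mp jh.2; omega
  · have := List.mem_range'_1.mp jh.2; omega

-- 'for k in range(2, 9): if number in reachable(k): return k; return -1'
def goB (N number : Int) (k : Nat) : Int :=
  if k < 9 then
    if PySem.Set.contains (reachB N k) number then (k : Int)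
    else goB N number (k + 1)
  else -1
termination_by 9 - k

def solution_alt (N : Int) (number : Int) : Int :=
  if N = number then 1 else goB N number 2

-- ===== PRECONDITION & SPEC =====
-- Pre_ excludes negative N with N ≠ number: there both Pythons raise ValueError
-- (int(str(N)*i) on the sign-bearing repeated string '-5-5…').
def Pre_solution (N : Int) (number : Int) : Prop := 0 ≤ N ∨ N = number
instance (N : Int) (number : Int) : Decidable (Pre_solution N number) := by
  unfold Pre_solution; infer_instance

def pvWitness_solution : Int × Int := (5, 12)

def Spec_solution (N : Int) (number : Int) (out : Int) : Prop := out = solution_alt N number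
instance (N : Int) (number : Int) (out : Int) : Decidable (Spec_solution N number out) := by
  unfold Spec_solution; infer_instance

-- ===== CLAIM (what is proved, stated in full; the proofs are below) =====
def Claim_equal_solution : Prop := ∀ (N : Int) (number : Int), Dom_solution N number → Pre_solution N number → Spec_solution N number (solution N number)

-- ===== LEMMAS AND PROOFS =====

-- the values produced by one application of ops4
def OpVal (a b x : Int) : Prop :=
  x = a + b ∨ x = a - b ∨ x = a * b ∨ (b ≠ 0 ∧ x = PySem.Int.floordiv a b)

lemma mem_ops4 (s : PySem.Set Int) (a b x : Int) :
    x ∈ ops4 s a b ↔ x ∈ s ∨ OpVal a b x := by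
  unfold ops4 OpVal
  split_ifs with h <;> simp [PySem.Set.mem_add] <;> tauto

lemma mem_innerFold (ys : List Int) (a : Int) (s : PySem.Set Int) (x : Int) :
    x ∈ ys.foldl (fun s b => ops4 s a b) s ↔ x ∈ s ∨ ∃ b ∈ ys, OpVal a b x := by
  induction ys generalizing s with
  | nil => simp
  | cons b t ih =>
    simp only [List.foldl_cons, ih, mem_ops4, List.mem_cons]
    constructor
    · rintro ((h | hv) | ⟨b', hb', hv⟩)
      · exact .inl h
      · exact .inr ⟨b, .inl rfl, hv⟩
      · exact .inr ⟨b', .inr hb', hv⟩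
    · rintro (h | ⟨b', (rfl | hb'), hv⟩)
      · exact .inl (.inl h)
      · exact .inl (.inr hv)
      · exact .inr ⟨b', hb', hv⟩

lemma mem_pairFold (xs ys : List Int) (s : PySem.Set Int) (x : Int) :
    x ∈ pairFold xs ys s ↔ x ∈ s ∨ ∃ a ∈ xs, ∃ b ∈ ys, OpVal a b x := by
  unfold pairFold
  induction xs generalizing s with
  | nil => simp
  | cons a t ih =>
    simp only [List.foldl_cons, ih, mem_innerFold, List.mem_cons]
    constructor
    · rintro ((h | ⟨b, hb, hv⟩) | ⟨a', ha', b, hb, hv⟩)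
      · exact .inl h
      · exact .inr ⟨a, .inl rfl, b, hb, hv⟩
      · exact .inr ⟨a', .inr ha', b, hb, hv⟩
    · rintro (h | ⟨a', (rfl | ha'), b, hb, hv⟩)
      · exact .inl (.inl h)
      · exact .inl (.inr ⟨b, hb, hv⟩)
      · exact .inr ⟨a', ha', b, hb, hv⟩

lemma mem_rangeFold (L : List Nat) (f g : Nat → List Int) (s0 : PySem.Set Int) (x : Int) :
    x ∈ L.foldl (fun s j => pairFold (f j) (g j) s) s0 ↔
      x ∈ s0 ∨ ∃ j ∈ L, ∃ a ∈ f j, ∃ b ∈ g j, OpVal a b x := by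
  induction L generalizing s0 with
  | nil => simp
  | cons j t ih =>
    simp only [List.foldl_cons, ih, mem_pairFold, List.mem_cons]
    constructor
    · rintro ((h | h) | ⟨j', hj', h⟩)
      · exact .inl h
      · exact .inr ⟨j, .inl rfl, h⟩
      · exact .inr ⟨j', .inr hj', h⟩
    · rintro (h | ⟨j', (rfl | hj'), h⟩)
      · exact .inl (.inl h)
      · exact .inl (.inr h)
      · exact .inr ⟨j', hj', h⟩

lemma foldl_fun_congr {α β : Type} (l : List α) (f g : β → α → β)
    (h : ∀ a ∈ l, ∀ s, f s a = g s a) : ∀ s : β, l.foldl f s = l.foldl g s := by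
  induction l with
  | nil => intro s; rfl
  | cons a t ih =>
    intro s
    simp only [List.foldl_cons]
    rw [h a (by simp)]
    exact ih (fun a' ha' s' => h a' (by simp [ha']) s') _

-- A's level sets as a pure recursion (proof-side mirror of A's in-place slot updates)
def levelA (N : Int) (i : Nat) : PySem.Set Int :=
  (List.range i).attach.foldl
    (fun s jh => pairFold (levelA N jh.1) (levelA N (i - jh.1 - 1)) s)
    (PySem.Set.add PySem.Set.empty (pyRepInt N (i + 1)))
termination_by i
decreasing_by
  · have := List.mem_range.mp jh.2; omega
  · have := List.mem_range.mp jh.2; omega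

lemma levelA_eq_plain (N : Int) (i : Nat) :
    levelA N i = (List.range i).foldl
      (fun s j => pairFold (levelA N j) (levelA N (i - j - 1)) s)
      (PySem.Set.add PySem.Set.empty (pyRepInt N (i + 1))) := by
  conv_lhs => rw [levelA]
  exact List.foldl_attach (l := List.range i)
    (f := fun s j => pairFold (levelA N j) (levelA N (i - j - 1)) s)

lemma levelA_char (N : Int) (i : Nat) (x : Int) :
    x ∈ levelA N i ↔ x = pyRepInt N (i + 1) ∨
      ∃ j ∈ List.range i, ∃ a ∈ levelA N j, ∃ b ∈ levelA N (i - j - 1), OpVal a b x := by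
  rw [levelA_eq_plain, mem_rangeFold]
  simp [PySem.Set.empty]

lemma reachB_eq_plain (N : Int) (k : Nat) :
    reachB N k = (List.range' 1 (k - 1)).foldl
      (fun s j => pairFold (reachB N j) (reachB N (k - j)) s)
      (PySem.Set.add PySem.Set.empty (pyRepInt N k)) := by
  conv_lhs => rw [reachB]
  exact List.foldl_attach (l := List.range' 1 (k - 1))
    (f := fun s j => pairFold (reachB N j) (reachB N (k - j)) s)

lemma reachB_char (N : Int) (k : Nat) (x : Int) :
    x ∈ reachB N k ↔ x = pyRepInt N k ∨
      ∃ j ∈ List.range' 1 (k - 1), ∃ a ∈ reachB N j, ∃ b ∈ reachB N (k - j), OpVal a b x := by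
  rw [reachB_eq_plain, mem_rangeFold]
  simp [PySem.Set.empty]

lemma mem_levelA (N : Int) (i : Nat) : ∀ x : Int, x ∈ levelA N i ↔ x ∈ reachB N (i + 1) := by
  induction i using Nat.strong_induction_on with
  | _ i ih =>
    intro x
    rw [levelA_char, reachB_char]
    have hk : i + 1 - 1 = i := by omega
    rw [hk]
    constructor
    · rintro (h | ⟨j, hj, a, ha, b, hb, hv⟩)
      · exact .inl h
      · have hji : j < i := List.mem_range.mp hj
        refine .inr ⟨j + 1, List.mem_range'_1.mpr (by omega), a, (ih j hji a).mp ha, b, ?_, hv⟩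
        have h2 : i + 1 - (j + 1) = (i - j - 1) + 1 := by omega
        rw [h2]
        exact (ih (i - j - 1) (by omega) b).mp hb
    · rintro (h | ⟨j', hj', a, ha, b, hb, hv⟩)
      · exact .inl h
      · have hji : 1 ≤ j' ∧ j' < 1 + i := List.mem_range'_1.mp hj'
        refine .inr ⟨j' - 1, List.mem_range.mpr (by omega), a, ?_, b, ?_, hv⟩
        · have h1 : (j' - 1) + 1 = j' := by omega
          rw [(ih (j' - 1) (by omega) a), h1]
          exact ha
        · have h2 : (i - (j' - 1) - 1) + 1 = i + 1 - j' := by omega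
          rw [(ih (i - (j' - 1) - 1) (by omega) b), h2]
          exact hb

lemma contains_congr (s t : PySem.Set Int) (x : Int) (h : ∀ y, y ∈ s ↔ y ∈ t) :
    PySem.Set.contains s x = PySem.Set.contains t x := by
  have hx := h x
  by_cases hs : x ∈ s
  · have ht := hx.mp hs
    simp [PySem.Set.contains, hs, ht]
  · have ht : x ∉ t := fun hxt => hs (hx.mpr hxt)
    simp only [PySem.Set.contains]
    simp [hs, ht]

-- the list state of goA at entry to iteration i
def stateA (N : Int) (i : Nat) : List (PySem.Set Int) :=
  (List.range 8).map
    (fun k => if k < i then levelA N k else PySem.Set.add PySem.Set.empty (pyRepInt N (k + 1)))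

lemma stateA_getD (N : Int) (i k : Nat) (hk : k < 8) :
    (stateA N i).getD k PySem.Set.empty =
      if k < i then levelA N k else PySem.Set.add PySem.Set.empty (pyRepInt N (k + 1)) := by
  unfold stateA
  rw [List.getD_eq_getElem?_getD]
  simp [hk]

lemma stepA_stateA (N : Int) (i : Nat) (hi : i < 8) :
    stepA (stateA N i) i = levelA N i := by
  unfold stepA
  rw [stateA_getD N i i hi, if_neg (by omega), levelA_eq_plain]
  apply foldl_fun_congr
  intro j hj s
  have hji : j < i := List.mem_range.mp hj
  rw [stateA_getD N i j (by omega), stateA_getD N i (i - j - 1) (by omega),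
    if_pos hji, if_pos (by omega)]

lemma stateA_set (N : Int) (i : Nat) (_hi : i < 8) :
    (stateA N i).set i (levelA N i) = stateA N (i + 1) := by
  apply List.ext_getElem
  · simp [stateA]
  · intro k h1 h2
    simp only [stateA, List.getElem_set, List.getElem_map, List.getElem_range]
    have hk : k < 8 := by simpa [stateA] using h2
    by_cases hik : i = k
    · subst hik; simp [show i < i + 1 by omega]
    · rw [if_neg hik]
      by_cases hki : k < i
      · rw [if_pos hki, if_pos (by omega)]
      · rw [if_neg hki, if_neg (by omega)]

lemma goA_eq_goB (N number : Int) :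
    ∀ (n i : Nat), n = 8 - i → 1 ≤ i → i ≤ 8 →
      goA number (stateA N i) i = goB N number (i + 1) := by
  intro n
  induction n with
  | zero =>
    intro i hn h1 h8
    have : i = 8 := by omega
    subst this
    rw [goA, goB]
    norm_num
  | succ m ih =>
    intro i hn h1 h8
    have hi : i < 8 := by omega
    have h9 : i + 1 < 9 := by omega
    rw [goA, goB, if_pos hi, if_pos h9]
    simp only [stepA_stateA N i hi,
      contains_congr (levelA N i) (reachB N (i + 1)) number (mem_levelA N i)]
    by_cases hc : PySem.Set.contains (reachB N (i + 1)) number = true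
    · rw [if_pos hc, if_pos hc]; push_cast; ring
    · rw [if_neg hc, if_neg hc, stateA_set N i hi]
      exact ih (i + 1) (by omega) (by omega) (by omega)

lemma levelA_zero (N : Int) : levelA N 0 = PySem.Set.add PySem.Set.empty (pyRepInt N 1) := by
  rw [levelA]; rfl

-- ===== VERDICT (by name: the statement is the Claim_ definition above) =====
theorem solution_spec : Claim_equal_solution := by
  intro N number _ _
  unfold Spec_solution solution solution_alt
  split_ifs with h
  · rfl
  · have hinit :
        ((List.range 8).map (fun k => PySem.Set.add PySem.Set.empty (pyRepInt N (k + 1)))) =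
          stateA N 1 := by
      unfold stateA
      apply List.map_congr_left
      intro k _
      by_cases hk : k < 1
      · have : k = 0 := by omega
        subst this
        simp [levelA_zero]
      · rw [if_neg hk]
    simp only
    rw [hinit]
    exact goA_eq_goB N number 7 1 (by omega) (by omega) (by omega)
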